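-- pv_equiv track=rewrite | github.com/EdwinUn/Programas-ED | Unidad 5 y 6/ADA2 - MetOrdenamiento2/sorting_algorithms.py | heapsort_generator
-- ===== SOURCE A (Python) =====
-- def heapsort_generator(arr):
--     n = len(arr)
--
--     def heapify(arr, n, i):
--         largest = i
--         left = 2 * i + 1
--         right = 2 * i + 2
--
--         if left < n:
--             yield arr[:], [i, left], f"Comparando padre [{i}] con hijo izq [{left}]"
--             if arr[left] > arr[largest]:
--                 largest = left
--
--         if right < n:
--             yield arr[:], [largest, right], f"Comparando [{largest}] con hijo der [{right}]"
--             if arr[right] > arr[largest]: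
--                 largest = right
--
--         if largest != i:
--             arr[i], arr[largest] = arr[largest], arr[i]
--             yield arr[:], [i, largest], f"Intercambiando [{i}] y [{largest}]"
--             yield from heapify(arr, n, largest)
--
--     # Construir max-heap
--     for i in range(n // 2 - 1, -1, -1):
--         yield from heapify(arr, n, i)
--
--     # Extraer elementos del heap
--     for i in range(n - 1, 0, -1):
--         arr[0], arr[i] = arr[i], arr[0]
--         yield arr[:], [0, i], f"Extrayendo máximo a posición [{i}]"
--         yield from heapify(arr, i, 0)
--
--     yield arr[:], [], "Completado"
-- ===== SOURCE B (Python) =====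
-- def heapsort_generator(arr):
--     # Pure-functional heapsort trace: works on its own copy (never mutates the
--     # caller's list, unlike A), with an iterative sift built from small helpers.
--     def br(k):
--         return f"[{k}]"
--
--     def swapped(v, x, y):
--         w = list(v)
--         w[x], w[y] = w[y], w[x]
--         return w
--
--     def pick(v, hi, cand, cur):
--         # index of the larger value among cand (if in range) and cur
--         return cand if cand < hi and v[cand] > v[cur] else cur
--
--     def scan(v, hi, j, steps):
--         # the two compare steps at node j; returns extended steps and target child
--         l = 2 * j + 1
--         r = l + 1
--         if l < hi:
--             steps = steps + [(list(v), [j, l], f"Comparando padre {br(j)} con hijo izq {br(l)}")]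
--         m = pick(v, hi, l, j)
--         if r < hi:
--             steps = steps + [(list(v), [m, r], f"Comparando {br(m)} con hijo der {br(r)}")]
--         return steps, pick(v, hi, r, m)
--
--     def sift(v, hi, j):
--         # iterative sift-down; returns the new array and its trace
--         steps = []
--         while True:
--             steps, m = scan(v, hi, j, steps)
--             if m == j:
--                 return v, steps
--             v = swapped(v, j, m)
--             steps = steps + [(list(v), [j, m], f"Intercambiando {br(j)} y {br(m)}")]
--             j = m
--
--     v = list(arr)
--     n = len(v)
--     for j in range(n // 2)[::-1]:
--         v, s = sift(v, n, j)
--         yield from s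
--     for e in range(1, n)[::-1]:
--         v = swapped(v, 0, e)
--         yield list(v), [0, e], f"Extrayendo máximo a posición {br(e)}"
--         v, s = sift(v, e, 0)
--         yield from s
--     yield list(v), [], "Completado"
-- ===== Notes on version B (the rewrite author's own statement) =====
-- stated objective: alternative
-- what changed: A's self-recursive in-place generator heapify is replaced by a pure-functional decomposition: B works on its own copy via small helpers (swapped/pick/scan) and an iterative sift loop that returns (new array, trace) per call, never mutating the caller's list; same step sequence.
import Mathlib
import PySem

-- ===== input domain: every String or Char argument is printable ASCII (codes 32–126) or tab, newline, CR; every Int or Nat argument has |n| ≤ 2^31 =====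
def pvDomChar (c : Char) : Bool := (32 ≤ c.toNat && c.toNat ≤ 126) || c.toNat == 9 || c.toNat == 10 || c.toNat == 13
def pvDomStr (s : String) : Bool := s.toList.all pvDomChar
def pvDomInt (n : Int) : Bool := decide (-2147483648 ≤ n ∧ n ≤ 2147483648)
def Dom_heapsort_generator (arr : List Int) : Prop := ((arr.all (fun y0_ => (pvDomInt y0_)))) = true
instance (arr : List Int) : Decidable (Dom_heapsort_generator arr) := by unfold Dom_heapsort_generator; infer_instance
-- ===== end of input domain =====

-- B replaces A's self-recursive in-place generator heapify by a pure-functional decomposition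
-- (helpers swapped/pick/scan + an iterative sift returning (array, trace)); objective: alternative.
-- Side effects: Python A mutates `arr` in place, B never mutates the caller's list; the
-- equivalence proved here is about the yielded sequence only.

-- ===== PORT A =====
-- arr[k]: every access is at a nonnegative index < heap size ≤ len(arr), so getD is exact here
def pvGet (a : List Int) (k : Nat) : Int := a.getD k 0

-- the two guarded compare-yields at the top of A's heapify body, literally:
-- returns (the yielded steps, the final `largest`)
def pvStepA (arr : List Int) (n i : Nat) : List (List Int × List Int × String) × Nat :=
  let left := 2 * i + 1
  let right := 2 * i + 2
  let ys1 := if left < n then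
      [(arr, [(i : Int), (left : Int)],
        "Comparando padre [" ++ PySem.Int.toStr i ++ "] con hijo izq [" ++ PySem.Int.toStr left ++ "]")]
    else []
  let l1 := if left < n ∧ pvGet arr left > pvGet arr i then left else i
  let ys2 := if right < n then
      [(arr, [(l1 : Int), (right : Int)],
        "Comparando [" ++ PySem.Int.toStr l1 ++ "] con hijo der [" ++ PySem.Int.toStr right ++ "]")]
    else []
  let l2 := if right < n ∧ pvGet arr right > pvGet arr l1 then right else l1
  (ys1 ++ ys2, l2)

-- `largest` either stays i or moves to a strictly larger in-range child (used for termination)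
theorem pvStepA_snd (arr : List Int) (n i : Nat) :
    (pvStepA arr n i).2 = i ∨ (i < (pvStepA arr n i).2 ∧ (pvStepA arr n i).2 < n) := by
  simp only [pvStepA]
  split_ifs <;>
    first
      | exact Or.inl rfl
      | (refine Or.inr ⟨by omega, ?_⟩; tauto)

-- transliteration of A's recursive generator `heapify(arr, n, i)`: returns (mutated arr, yielded steps)
def pvHeapifyA (arr : List Int) (n i : Nat) : List Int × List (List Int × List Int × String) :=
  let s := pvStepA arr n i
  if h : s.2 ≠ i then
    let arr2 := (arr.set i (pvGet arr s.2)).set s.2 (pvGet arr i)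
    let rest := pvHeapifyA arr2 n s.2
    (rest.1, s.1 ++ (arr2, [(i : Int), (s.2 : Int)],
      "Intercambiando [" ++ PySem.Int.toStr i ++ "] y [" ++ PySem.Int.toStr s.2 ++ "]") :: rest.2)
  else (arr, s.1)
termination_by n - i
decreasing_by
  rcases pvStepA_snd arr n i with hh | hh
  · exact absurd hh h
  · omega

-- body of A's first for-loop (build max-heap), state = (arr, yields so far)
def pvBuildStepA (n : Nat) (st : List Int × List (List Int × List Int × String)) (i : Int) :
    List Int × List (List Int × List Int × String) :=
  let r := pvHeapifyA st.1 n i.toNat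
  (r.1, st.2 ++ r.2)

-- body of A's second for-loop (extract), state = (arr, yields so far)
def pvExtractStepA (st : List Int × List (List Int × List Int × String)) (i : Int) :
    List Int × List (List Int × List Int × String) :=
  let a := st.1
  let a2 := (a.set 0 (pvGet a i.toNat)).set i.toNat (pvGet a 0)
  let r := pvHeapifyA a2 i.toNat 0
  (r.1, st.2 ++ (a2, [0, i],
    "Extrayendo máximo a posición [" ++ PySem.Int.toStr i ++ "]") :: r.2)

def heapsort_generator (arr : List Int) : List (List Int × List Int × String) :=
  let n : Int := arr.length
  let st1 := (PySem.List.pyRange (PySem.Int.floordiv n 2 - 1) (-1) (-1)).foldl (pvBuildStepA arr.length) (arr, [])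
  let st2 := (PySem.List.pyRange (n - 1) 0 (-1)).foldl pvExtractStepA st1
  st2.2 ++ [(st2.1, [], "Completado")]

-- ===== PORT B =====
-- br(k) = "[k]"
def hsBr (k : Nat) : String := "[" ++ toString k ++ "]"

-- one yielded tuple: a snapshot of the array, the two indices, the message
def hsStep (v : List Int) (x y : Nat) (m : String) : List Int × List Int × String :=
  (v, [(x : Int), (y : Int)], m)

-- swapped(v, x, y): a fresh list with positions x, y exchanged
def hsSwap (v : List Int) (x y : Nat) : List Int :=
  (v.set x (v.getD y 0)).set y (v.getD x 0)

-- pick(v, hi, cand, cur): index of the larger value among cand (if in range) and cur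
def hsPick (v : List Int) (hi cand cur : Nat) : Nat :=
  if cand < hi ∧ v.getD cand 0 > v.getD cur 0 then cand else cur

-- scan(v, hi, j, steps): the two compare steps at node j; extended steps and target child
def hsScan (v : List Int) (hi j : Nat) (steps : List (List Int × List Int × String)) :
    List (List Int × List Int × String) × Nat :=
  let l := 2 * j + 1
  let r := l + 1
  let steps1 := if l < hi then
      steps ++ [hsStep v j l ("Comparando padre " ++ hsBr j ++ " con hijo izq " ++ hsBr l)]
    else steps
  let m := hsPick v hi l j
  let steps2 := if r < hi then
      steps1 ++ [hsStep v m r ("Comparando " ++ hsBr m ++ " con hijo der " ++ hsBr r)]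
    else steps1
  (steps2, hsPick v hi r m)

-- the target child is j itself or a strictly deeper in-range index (used for termination)
theorem hsScan_snd (v : List Int) (hi j : Nat) (steps : List (List Int × List Int × String)) :
    (hsScan v hi j steps).2 = j ∨ (j < (hsScan v hi j steps).2 ∧ (hsScan v hi j steps).2 < hi) := by
  simp only [hsScan, hsPick]
  split_ifs <;>
    first
      | exact Or.inl rfl
      | (refine Or.inr ⟨by omega, ?_⟩; tauto)

-- sift(v, hi, j): iterative sift-down, returns the new array and its trace
def hsSift (v : List Int) (hi j : Nat) (steps : List (List Int × List Int × String)) :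
    List Int × List (List Int × List Int × String) :=
  let p := hsScan v hi j steps
  if h : p.2 = j then (v, p.1)
  else
    let w := hsSwap v j p.2
    hsSift w hi p.2 (p.1 ++ [hsStep w j p.2 ("Intercambiando " ++ hsBr j ++ " y " ++ hsBr p.2)])
termination_by hi - j
decreasing_by
  rcases hsScan_snd v hi j steps with hh | hh
  · exact absurd hh h
  · omega

-- `for j in range(n // 2)[::-1]`: count k = n//2 down, sifting at index k-1
def hsBuild (v : List Int) (hi : Nat) : Nat → List Int × List (List Int × List Int × String)
  | 0 => (v, [])
  | k + 1 =>
      let p := hsSift v hi k []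
      let q := hsBuild p.1 hi k
      (q.1, p.2 ++ q.2)

-- `for e in range(1, n)[::-1]`: count e = n-1 down to 1 (argument e+1 is the current index)
def hsTear (v : List Int) : Nat → List Int × List (List Int × List Int × String)
  | 0 => (v, [])
  | e + 1 =>
      let w := hsSwap v 0 (e + 1)
      let x := hsStep w 0 (e + 1) ("Extrayendo máximo a posición " ++ hsBr (e + 1))
      let p := hsSift w (e + 1) 0 []
      let q := hsTear p.1 e
      (q.1, x :: (p.2 ++ q.2))

def heapsort_generator_alt (arr : List Int) : List (List Int × List Int × String) :=
  let n := arr.length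
  let b := hsBuild arr n (n / 2)
  let t := hsTear b.1 (n - 1)
  b.2 ++ t.2 ++ [(t.1, [], "Completado")]

-- ===== PRECONDITION & SPEC =====
def Spec_heapsort_generator (arr : List Int) (out : List (List Int × List Int × String)) : Prop := out = heapsort_generator_alt arr
instance (arr : List Int) (out : List (List Int × List Int × String)) : Decidable (Spec_heapsort_generator arr out) := by unfold Spec_heapsort_generator; infer_instance

-- ===== CLAIM (what is proved, stated in full; the proofs are below) =====
def Claim_equal_heapsort_generator : Prop := ∀ (arr : List Int), Dom_heapsort_generator arr → Spec_heapsort_generator arr (heapsort_generator arr)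

-- ===== LEMMAS AND PROOFS =====

theorem toStr_nat (k : Nat) : PySem.Int.toStr (k : Int) = toString k := by
  simp [PySem.Int.toStr, PySem.Int.toChars, Nat.repr, String.ofList]
  rw [if_neg (by omega)]

theorem msgL (i l : Nat) :
    "Comparando padre " ++ hsBr i ++ " con hijo izq " ++ hsBr l
      = "Comparando padre [" ++ PySem.Int.toStr (i : Int) ++ "] con hijo izq [" ++ PySem.Int.toStr (l : Int) ++ "]" := by
  simp only [hsBr, toStr_nat]
  simp only [← String.append_assoc]
  rw [show "Comparando padre " ++ "[" = "Comparando padre [" from rfl]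
  simp only [String.append_assoc]
  rw [show ("]" : String) ++ (" con hijo izq " ++ ("[" ++ (toString l ++ "]")))
        = "] con hijo izq [" ++ (toString l ++ "]") from by
    simp only [← String.append_assoc]; rfl]

theorem msgR (m r : Nat) :
    "Comparando " ++ hsBr m ++ " con hijo der " ++ hsBr r
      = "Comparando [" ++ PySem.Int.toStr (m : Int) ++ "] con hijo der [" ++ PySem.Int.toStr (r : Int) ++ "]" := by
  simp only [hsBr, toStr_nat]
  simp only [← String.append_assoc]
  rw [show "Comparando " ++ "[" = "Comparando [" from rfl]
  simp only [String.append_assoc]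
  rw [show ("]" : String) ++ (" con hijo der " ++ ("[" ++ (toString r ++ "]")))
        = "] con hijo der [" ++ (toString r ++ "]") from by
    simp only [← String.append_assoc]; rfl]

theorem msgS (i m : Nat) :
    "Intercambiando " ++ hsBr i ++ " y " ++ hsBr m
      = "Intercambiando [" ++ PySem.Int.toStr (i : Int) ++ "] y [" ++ PySem.Int.toStr (m : Int) ++ "]" := by
  simp only [hsBr, toStr_nat]
  simp only [← String.append_assoc]
  rw [show "Intercambiando " ++ "[" = "Intercambiando [" from rfl]
  simp only [String.append_assoc]
  rw [show ("]" : String) ++ (" y " ++ ("[" ++ (toString m ++ "]")))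
        = "] y [" ++ (toString m ++ "]") from by
    simp only [← String.append_assoc]; rfl]

theorem msgE (e : Nat) :
    "Extrayendo máximo a posición " ++ hsBr e
      = "Extrayendo máximo a posición [" ++ PySem.Int.toStr (e : Int) ++ "]" := by
  simp only [hsBr, toStr_nat]
  simp only [← String.append_assoc]
  rw [show "Extrayendo máximo a posición " ++ "[" = "Extrayendo máximo a posición [" from rfl]

-- B's scan is A's compare block with the accumulator prepended
theorem hsScan_eq (v : List Int) (hi j : Nat) (steps : List (List Int × List Int × String)) :
    hsScan v hi j steps = (steps ++ (pvStepA v hi j).1, (pvStepA v hi j).2) := by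
  simp only [hsScan, pvStepA, hsStep, hsPick, pvGet, msgL, msgR,
    show 2 * j + 1 + 1 = 2 * j + 2 from rfl]
  split_ifs <;> simp

-- B's iterative sift equals A's recursive heapify (with the accumulator prepended)
theorem hsSift_eq_aux (hi : Nat) : ∀ (m : Nat) (v : List Int) (j : Nat)
    (steps : List (List Int × List Int × String)), hi - j ≤ m →
    hsSift v hi j steps = ((pvHeapifyA v hi j).1, steps ++ (pvHeapifyA v hi j).2) := by
  intro m
  induction m with
  | zero =>
    intro v j steps hm
    have hs2 : (hsScan v hi j steps).2 = (pvStepA v hi j).2 := by rw [hsScan_eq]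
    have hs1 : (hsScan v hi j steps).1 = steps ++ (pvStepA v hi j).1 := by rw [hsScan_eq]
    rcases pvStepA_snd v hi j with hh | hh
    · rw [hsSift, pvHeapifyA, dif_pos (hs2.trans hh), dif_neg (not_not_intro hh), hs1]
    · omega
  | succ m ih =>
    intro v j steps hm
    have hs2 : (hsScan v hi j steps).2 = (pvStepA v hi j).2 := by rw [hsScan_eq]
    have hs1 : (hsScan v hi j steps).1 = steps ++ (pvStepA v hi j).1 := by rw [hsScan_eq]
    rw [hsSift, pvHeapifyA]
    by_cases hc : (pvStepA v hi j).2 = j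
    · rw [dif_pos (hs2.trans hc), dif_neg (not_not_intro hc), hs1]
    · rw [dif_neg (fun hh => hc (hs2.symm.trans hh)), dif_pos hc, hs1, hs2]
      rcases pvStepA_snd v hi j with hh | hh
      · exact absurd hh hc
      · rw [ih _ _ _ (by omega)]
        simp [hsSwap, hsStep, pvGet, msgS, List.append_assoc]

theorem hsSift_eq (v : List Int) (hi j : Nat) (steps : List (List Int × List Int × String)) :
    hsSift v hi j steps = ((pvHeapifyA v hi j).1, steps ++ (pvHeapifyA v hi j).2) :=
  hsSift_eq_aux hi (hi - j) v j steps le_rfl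

theorem hsBuild_eq (n k : Nat) (st : List Int × List (List Int × List Int × String)) :
    (PySem.List.pyRange ((k : Int) - 1) (-1) (-1)).foldl (pvBuildStepA n) st
      = ((hsBuild st.1 n k).1, st.2 ++ (hsBuild st.1 n k).2) := by
  induction k generalizing st with
  | zero =>
    rw [show ((0 : Nat) : Int) - 1 = (-1 : Int) by norm_num,
      PySem.List.pyRange_neg_one_eq_nil le_rfl]
    simp [hsBuild]
  | succ k ih =>
    rw [show ((k + 1 : Nat) : Int) - 1 = (k : Int) by push_cast; ring,
      PySem.List.pyRange_neg_one_cons (by omega : (-1 : Int) < (k : Int))]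
    simp only [List.foldl_cons]
    rw [ih]
    simp only [hsBuild]
    simp [pvBuildStepA, hsSift_eq]

theorem hsTear_eq (e : Nat) (st : List Int × List (List Int × List Int × String)) :
    (PySem.List.pyRange (e : Int) 0 (-1)).foldl pvExtractStepA st
      = ((hsTear st.1 e).1, st.2 ++ (hsTear st.1 e).2) := by
  induction e generalizing st with
  | zero => rw [PySem.List.pyRange_neg_one_eq_nil (by norm_num)]; simp [hsTear]
  | succ e ih =>
    rw [PySem.List.pyRange_neg_one_cons (by positivity : (0 : Int) < ((e + 1 : Nat) : Int)),
      show ((e + 1 : Nat) : Int) - 1 = ((e : Nat) : Int) by push_cast; ring]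
    simp only [List.foldl_cons]
    rw [ih]
    simp only [hsTear]
    simp [pvExtractStepA, hsSift_eq, hsSwap, hsStep, pvGet, msgE]

-- ===== VERDICT (by name: the statement is the Claim_ definition above) =====
theorem heapsort_generator_spec : Claim_equal_heapsort_generator := by
  intro arr _
  unfold Spec_heapsort_generator
  simp only [heapsort_generator, heapsort_generator_alt]
  rw [show PySem.Int.floordiv (arr.length : Int) 2 = ((arr.length / 2 : Nat) : Int) from by
      exact_mod_cast PySem.Int.floordiv_natCast arr.length 2, hsBuild_eq]
  rcases Nat.eq_zero_or_pos arr.length with h0 | hpos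
  · rw [h0]
    rw [show ((0 : Nat) : Int) - 1 = (-1 : Int) by norm_num,
      PySem.List.pyRange_neg_one_eq_nil (by norm_num)]
    simp [hsTear, hsBuild]
  · rw [show ((arr.length : Int) - 1) = ((arr.length - 1 : Nat) : Int) by omega, hsTear_eq]
    simp
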